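-- pv_equiv track=rewrite | github.com/r3yc0n1c/CTF-Writeups | 2021/darkCON-2021/Crypto/Tony And James/sol/apex.py | get_seed
-- ===== SOURCE A (Python) =====
-- def get_seed(raw_00, l):
-- 	seed = 0
-- 	raw = [raw_00]
-- 	for i in range(1,l):
-- 		seed += raw_00
-- 		raw.append(raw_00 >> 1)
-- 		raw_00 = raw_00 >> 1
-- 	return raw, seed
-- ===== SOURCE B (Python) =====
-- def get_seed(raw_00, l):
--     # build the shift list BACK-TO-FRONT: place the last element first (it is
--     # excluded from seed), walk k downwards accumulating seed, then reverse.
--     k = max(l, 1) - 1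
--     raw = [raw_00 >> k]
--     seed = 0
--     while k > 0:
--         k -= 1
--         v = raw_00 >> k
--         seed += v
--         raw.append(v)
--     raw.reverse()
--     return raw, seed
-- ===== Notes on version B (the rewrite author's own statement) =====
-- stated objective: alternative
-- what changed: A fuses everything into one forward loop that rewrites raw_00 by repeated >>1; B traverses in the opposite direction: it places the final element first, walks the shift index k downward in a while loop computing raw_00 >> k directly while accumulating seed, and reverses the list at the end.
import Mathlib
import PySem

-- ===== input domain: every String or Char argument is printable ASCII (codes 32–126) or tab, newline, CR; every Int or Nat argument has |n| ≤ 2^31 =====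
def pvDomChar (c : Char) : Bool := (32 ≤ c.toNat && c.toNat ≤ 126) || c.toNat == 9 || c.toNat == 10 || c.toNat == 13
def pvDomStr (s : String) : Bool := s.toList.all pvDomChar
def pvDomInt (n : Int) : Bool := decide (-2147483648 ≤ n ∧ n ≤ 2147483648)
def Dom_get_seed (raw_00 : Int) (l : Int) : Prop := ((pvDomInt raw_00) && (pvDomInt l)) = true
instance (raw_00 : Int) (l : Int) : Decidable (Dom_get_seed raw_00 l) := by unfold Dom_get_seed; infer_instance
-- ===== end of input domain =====

-- B builds the shift list back-to-front (last element placed first, index k walked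
-- downward with direct shifts raw_00 >> k, list reversed at the end) instead of A's
-- forward loop that rewrites raw_00 by repeated >>1; objective: alternative.

-- ===== PORT A =====
-- A's loop body: seed += raw_00; raw.append(raw_00 >> 1); raw_00 = raw_00 >> 1, on state (seed, raw, raw_00)
def get_seed_body (st : Int × List Int × Int) : Int × List Int × Int :=
  (st.1 + st.2.2, st.2.1 ++ [st.2.2 >>> (1 : Int)], st.2.2 >>> (1 : Int))

-- fused loop over range(1, l), then return (raw, seed)
def get_seed (raw_00 : Int) (l : Int) : List Int × Int :=
  (((PySem.List.pyRange 1 l 1).foldl (fun st _ => get_seed_body st) (0, [raw_00], raw_00)).2.1,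
   ((PySem.List.pyRange 1 l 1).foldl (fun st _ => get_seed_body st) (0, [raw_00], raw_00)).1)

-- ===== PORT B =====
-- the while loop: while k > 0: k -= 1; v = raw_00 >> k; seed += v; raw.append(v)
-- (k = max(l,1)-1 ≥ 0, so the counter is a Nat; shifting by a Nat k equals Python's
--  raw_00 >> k since k ≥ 0)
def get_seed_whileB (r : Int) : Nat → List Int → Int → List Int × Int
  | 0, raw, seed => (raw, seed)
  | k+1, raw, seed => get_seed_whileB r k (raw ++ [r >>> k]) (seed + r >>> k)

-- k = max(l, 1) - 1; raw = [raw_00 >> k]; run the while loop; raw.reverse()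
def get_seed_alt (raw_00 : Int) (l : Int) : List Int × Int :=
  ((get_seed_whileB raw_00 ((max l 1).toNat - 1) [raw_00 >>> ((max l 1).toNat - 1)] 0).1.reverse,
   (get_seed_whileB raw_00 ((max l 1).toNat - 1) [raw_00 >>> ((max l 1).toNat - 1)] 0).2)

-- ===== PRECONDITION & SPEC =====
def Spec_get_seed (raw_00 : Int) (l : Int) (out : List Int × Int) : Prop := out = get_seed_alt raw_00 l
instance (raw_00 : Int) (l : Int) (out : List Int × Int) : Decidable (Spec_get_seed raw_00 l out) := by unfold Spec_get_seed; infer_instance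

-- ===== CLAIM (what is proved, stated in full; the proofs are below) =====
def Claim_equal_get_seed : Prop := ∀ (raw_00 : Int) (l : Int), Dom_get_seed raw_00 l → Spec_get_seed raw_00 l (get_seed raw_00 l)

-- ===== LEMMAS AND PROOFS =====

-- n-fold iteration of A's loop body (the body ignores the loop counter's value)
def iterA : Nat → (Int × List Int × Int) → Int × List Int × Int
  | 0, st => st
  | n+1, st => iterA n (get_seed_body st)

theorem foldA_eq_iterA (xs : List Int) (st : Int × List Int × Int) :
    xs.foldl (fun st _ => get_seed_body st) st = iterA xs.length st := by
  induction xs generalizing st with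
  | nil => rfl
  | cons x xs ih => simpa [iterA] using ih (get_seed_body st)

theorem iterA_succ' (n : Nat) (st : Int × List Int × Int) :
    iterA (n+1) st = get_seed_body (iterA n st) := by
  induction n generalizing st with
  | zero => rfl
  | succ m ih => exact ih (get_seed_body st)

theorem shift_one (r : Int) (m : Nat) : r >>> m >>> (1 : Int) = r >>> (m+1) := by
  rw [show (1:Int) = ((1:Nat):Int) from rfl, Int.shiftRight_natCast_right, ← Int.shiftRight_add]

theorem iterA_closed (r : Int) (n : Nat) :
    iterA n (0, [r], r)
      = (((List.range n).map (fun (k : Nat) => r >>> k)).sum,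
         (List.range (n+1)).map (fun (k : Nat) => r >>> k),
         r >>> n) := by
  induction n with
  | zero => simp [iterA]
  | succ m ih =>
    rw [iterA_succ', ih]
    simp only [get_seed_body, List.range_succ, List.map_append, List.sum_append]
    refine Prod.ext (by simp) (Prod.ext ?_ ?_) <;> simp [shift_one]

theorem whileB_closed (r : Int) (k : Nat) (raw : List Int) (seed : Int) :
    get_seed_whileB r k raw seed
      = (raw ++ ((List.range k).map (fun (j : Nat) => r >>> j)).reverse,
         seed + ((List.range k).map (fun (j : Nat) => r >>> j)).sum) := by
  induction k generalizing raw seed with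
  | zero => simp [get_seed_whileB]
  | succ m ih =>
    rw [get_seed_whileB, ih]
    simp only [List.range_succ, List.map_append, List.sum_append, List.reverse_append]
    refine Prod.ext ?_ ?_ <;> simp [add_assoc, add_comm]

-- ===== VERDICT (by name: the statement is the Claim_ definition above) =====
theorem get_seed_spec : Claim_equal_get_seed := by
  intro r l _
  unfold Spec_get_seed get_seed get_seed_alt
  rw [foldA_eq_iterA, PySem.List.length_pyRange_one, iterA_closed, whileB_closed]
  have h : (max l 1).toNat - 1 = (l-1).toNat := by omega
  rw [h]
  simp [List.range_succ]
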